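-- pv_equiv track=rewrite | github.com/sim222sim2yandex-collab/smart-schedule-app.v2 | fitness_evaluator.py | _detect_time_conflicts
-- ===== SOURCE A (Python) =====
-- def _detect_time_conflicts(chromosome):
--     """Detect scheduling conflicts (same cabinet, same time)"""
--
--     conflicts = 0
--     time_slots = {}
--
--     for gene in chromosome:
--         day = gene.get('day')
--         cabinet_id = gene.get('cabinet_id')
--         start_time = gene.get('start_time')
--
--         if day and cabinet_id and start_time:
--             slot_key = f"{day}_{cabinet_id}_{start_time}"
--
--             if slot_key in time_slots:
--                 conflicts += 1
--             else:
--                 time_slots[slot_key] = gene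
--
--     return conflicts
-- ===== SOURCE B (Python) =====
-- def _slot_key(gene):
--     day = gene.get('day')
--     cabinet_id = gene.get('cabinet_id')
--     start_time = gene.get('start_time')
--     if day and cabinet_id and start_time:
--         return f"{day}_{cabinet_id}_{start_time}"
--     return None
--
--
-- def _detect_time_conflicts(chromosome):
--     """Detect scheduling conflicts (same cabinet, same time)"""
--     ks = sorted(k for k in map(_slot_key, chromosome) if k is not None)
--     return sum(1 for a, b in zip(ks, ks[1:]) if a == b)
-- ===== Notes on version B (the rewrite author's own statement) =====
-- stated objective: alternative
-- what changed: Replaces A's hash-dict 'seen' set and running counter with a sort-then-scan: sort the slot keys and count adjacent equal pairs, which equals the number of duplicate occurrences because sorting groups equal keys contiguously.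
import Mathlib
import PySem

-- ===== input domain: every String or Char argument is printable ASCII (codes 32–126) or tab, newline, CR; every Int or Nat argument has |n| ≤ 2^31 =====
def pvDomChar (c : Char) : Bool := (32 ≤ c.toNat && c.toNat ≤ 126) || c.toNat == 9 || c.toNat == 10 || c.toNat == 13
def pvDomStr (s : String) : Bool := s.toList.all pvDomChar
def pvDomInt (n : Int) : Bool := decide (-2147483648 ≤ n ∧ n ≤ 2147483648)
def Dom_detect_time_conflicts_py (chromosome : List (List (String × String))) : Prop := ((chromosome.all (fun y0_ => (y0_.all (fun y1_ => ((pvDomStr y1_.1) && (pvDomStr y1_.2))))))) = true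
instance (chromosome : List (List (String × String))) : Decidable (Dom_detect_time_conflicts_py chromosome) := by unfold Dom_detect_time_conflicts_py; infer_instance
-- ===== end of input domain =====

-- B replaces A's hash-dict of seen keys and running counter by sort-then-scan:
-- sort the slot keys and count adjacent equal pairs (objective: alternative).


-- ===== PORT A =====
-- A-side helper: the body of A's for-loop over genes, acting on (conflicts, time_slots);
-- 'day and cabinet_id and start_time' is Python truthiness: .get returned a non-empty string.
def pvStepA (st : Int × PySem.Dict String (List (String × String)))
    (gene : List (String × String)) : Int × PySem.Dict String (List (String × String)) :=
  let conflicts := st.1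
  let time_slots := st.2
  let g := PySem.Dict.mk gene
  match g.get? "day", g.get? "cabinet_id", g.get? "start_time" with
  | some day, some cabinet_id, some start_time =>
    if day ≠ "" ∧ cabinet_id ≠ "" ∧ start_time ≠ "" then
      let slot_key := day ++ "_" ++ cabinet_id ++ "_" ++ start_time
      if time_slots.contains slot_key then
        (conflicts + 1, time_slots)
      else
        (conflicts, time_slots.insert slot_key gene)
    else st
  | _, _, _ => st

def detect_time_conflicts_py (chromosome : List (List (String × String))) : Int :=
  (chromosome.foldl pvStepA (0, PySem.Dict.empty)).1

-- ===== PORT B =====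
-- Source B's helper _slot_key: the slot key of a gene, or none if any field is falsy.
def pvSlotKey? (gene : List (String × String)) : Option String :=
  let g := PySem.Dict.mk gene
  match g.get? "day", g.get? "cabinet_id", g.get? "start_time" with
  | some day, some cabinet_id, some start_time =>
    if day ≠ "" ∧ cabinet_id ≠ "" ∧ start_time ≠ "" then
      some (day ++ "_" ++ cabinet_id ++ "_" ++ start_time)
    else none
  | _, _, _ => none

-- Source B's 'sum(1 for a, b in zip(ks, ks[1:]) if a == b)'.
def pvAdjSum (ks : List String) : Int :=
  ((ks.zip (ks.drop 1)).map (fun p => if p.1 = p.2 then (1 : Int) else 0)).sum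

def detect_time_conflicts_py_alt (chromosome : List (List (String × String))) : Int :=
  pvAdjSum (PySem.List.sorted ((chromosome.map pvSlotKey?).filterMap id) (fun s => s) false)

-- ===== PRECONDITION & SPEC =====
def Spec_detect_time_conflicts_py (chromosome : List (List (String × String))) (out : Int) : Prop := out = detect_time_conflicts_py_alt chromosome
instance (chromosome : List (List (String × String))) (out : Int) : Decidable (Spec_detect_time_conflicts_py chromosome out) := by unfold Spec_detect_time_conflicts_py; infer_instance

-- ===== CLAIM (what is proved, stated in full; the proofs are below) =====
def Claim_equal_detect_time_conflicts_py : Prop := ∀ (chromosome : List (List (String × String))), Dom_detect_time_conflicts_py chromosome → Spec_detect_time_conflicts_py chromosome (detect_time_conflicts_py chromosome)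

-- ===== LEMMAS AND PROOFS =====

-- A's loop step, characterised through B's key helper.
theorem pvStepA_eq (st : Int × PySem.Dict String (List (String × String)))
    (gene : List (String × String)) :
    pvStepA st gene
    = match pvSlotKey? gene with
      | some k =>
        if st.2.contains k then (st.1 + 1, st.2) else (st.1, st.2.insert k gene)
      | none => st := by
  simp only [pvStepA, pvSlotKey?]
  rcases (PySem.Dict.mk gene).get? "day" with _ | day <;>
    rcases (PySem.Dict.mk gene).get? "cabinet_id" with _ | cab <;>
      rcases (PySem.Dict.mk gene).get? "start_time" with _ | stt <;>
        simp only [] <;> split_ifs <;> simp [*]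

-- Loop invariant for A: the counter gains one per key already present among d's keys
-- or the earlier keys of the suffix.
theorem pvLoopA (l : List (List (String × String))) (c : Int)
    (d : PySem.Dict String (List (String × String))) :
    (l.foldl pvStepA (c, d)).1
    = c + ((l.filterMap pvSlotKey?).length : Int) + (d.keys.length : Int)
        - ((PySem.Set.update d.keys (l.filterMap pvSlotKey?)).length : Int) := by
  induction l generalizing c d with
  | nil => simp [PySem.Set.update]
  | cons gene rest ih =>
    rw [List.foldl_cons, pvStepA_eq (c, d) gene]
    rcases hk : pvSlotKey? gene with _ | k
    · simpa [hk] using ih c d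
    · simp only [List.filterMap_cons, hk]
      by_cases hc : d.contains k
      · have hmem : k ∈ d.keys := (PySem.Dict.contains_iff_mem_keys d k).mp hc
        simp only [hc, if_true]
        rw [ih, PySem.Set.update_cons, PySem.Set.add_of_mem hmem]
        simp; omega
      · have hmem : k ∉ d.keys := fun h => hc ((PySem.Dict.contains_iff_mem_keys d k).mpr h)
        simp only [hc, Bool.false_eq_true, if_false]
        rw [ih, PySem.Set.update_cons, PySem.Set.add_of_not_mem hmem,
          PySem.Dict.keys_insert_of_not_contains d gene (by simpa using hc)]
        simp; omega

-- B's adjacent-equal sum unfolds structurally on two leading elements.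
theorem pvAdjSum_cons_cons (a b : String) (t : List String) :
    pvAdjSum (a :: b :: t)
    = (if a = b then (1 : Int) else 0) + pvAdjSum (b :: t) := by
  simp [pvAdjSum, List.zip]

-- On a ≤-sorted list, adjacent-equal count + number of distinct elements = length.
theorem pvAdjSum_sorted (l : List String) (h : l.Pairwise (· ≤ ·)) :
    pvAdjSum l + (l.toFinset.card : Int) = (l.length : Int) := by
  induction l with
  | nil => simp [pvAdjSum]
  | cons a t ih =>
    cases t with
    | nil => simp [pvAdjSum]
    | cons b t' =>
      have hab : a ≤ b := (List.pairwise_cons.mp h).1 b (by simp)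
      have hbt : (b :: t').Pairwise (· ≤ ·) := (List.pairwise_cons.mp h).2
      have ih' := ih hbt
      rw [pvAdjSum_cons_cons]
      by_cases he : a = b
      · subst he
        rw [if_pos (rfl : a = a)]
        have hfs : (a :: a :: t').toFinset = (a :: t').toFinset := by simp
        rw [hfs]
        simp only [List.length_cons] at ih' ⊢
        push_cast at ih' ⊢
        omega
      · have hnot : a ∉ b :: t' := by
          intro hm
          rcases List.mem_cons.mp hm with h1 | h2
          · exact he h1
          · have hbx : b ≤ a := (List.pairwise_cons.mp hbt).1 a h2
            exact he (le_antisymm hab hbx)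
        have hcard : (a :: b :: t').toFinset.card = (b :: t').toFinset.card + 1 := by
          rw [List.toFinset_cons, Finset.card_insert_of_notMem (by simpa using hnot)]
        rw [if_neg he, hcard]
        simp only [List.length_cons] at ih' ⊢
        push_cast at ih' ⊢
        omega

-- set(xs) has as many elements as xs has distinct values.
theorem pvOfList_length (xs : List String) :
    (PySem.Set.ofList xs).length = xs.toFinset.card := by
  have hnd : (PySem.Set.ofList xs).Nodup := PySem.Set.nodup_ofList xs
  have hfin : (PySem.Set.ofList xs).toFinset = xs.toFinset := by
    apply Finset.ext
    intro x
    simp [List.mem_toFinset, PySem.Set.mem_ofList]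
  rw [← List.toFinset_card_of_nodup hnd, hfin]

-- ===== VERDICT (by name: the statement is the Claim_ definition above) =====
theorem detect_time_conflicts_py_spec : Claim_equal_detect_time_conflicts_py := by
  intro chromosome _
  unfold Spec_detect_time_conflicts_py detect_time_conflicts_py detect_time_conflicts_py_alt
  rw [pvLoopA]
  have hkeys : (chromosome.map pvSlotKey?).filterMap id = chromosome.filterMap pvSlotKey? := by
    simp [List.filterMap_map]
  rw [hkeys]
  have hperm : (PySem.List.sorted (chromosome.filterMap pvSlotKey?) (fun s => s) false).Perm
      (chromosome.filterMap pvSlotKey?) :=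
    PySem.List.sorted_perm _ (fun s => s) false
  have hsorted : (PySem.List.sorted (chromosome.filterMap pvSlotKey?) (fun s => s) false).Pairwise
      (· ≤ ·) := by
    simpa using PySem.List.sorted_pairwise (chromosome.filterMap pvSlotKey?) (fun s => s)
  have hadj := pvAdjSum_sorted _ hsorted
  rw [hperm.length_eq, List.toFinset_eq_of_perm _ _ hperm] at hadj
  rw [show (PySem.Dict.empty : PySem.Dict String (List (String × String))).keys = [] from rfl]
  rw [show PySem.Set.update ([] : PySem.Set String) (chromosome.filterMap pvSlotKey?)
      = PySem.Set.ofList (chromosome.filterMap pvSlotKey?) from rfl]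
  rw [pvOfList_length]
  rw [← hadj]
  simp
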